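-- pv_equiv track=rewrite | github.com/aorursy/KT_dataset_py | voyager2511_sentiment-analysis-kernel7e801cd45c.py | subsitute_clean
-- ===== SOURCE A (Python) =====
-- def subsitute_clean(tweet):
--     words = []
--     for word in tweet:
--         word = word.replace('#', '').replace('!', '').replace('?', '').replace('-', '').replace(':', '')\
--         .replace('2', '').replace("'", ''). replace('&', '').replace(')', '').replace('/', '').replace('(', '')
--         if word != '':
--             words.append(word)
--     return words
-- ===== SOURCE B (Python) =====
-- BAD = frozenset("#!?-:2'&)/(")
-- SEP = '\x00'
--
-- def subsitute_clean(tweet):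
--     joined = SEP.join(tweet)
--     cleaned = ''.join(c for c in joined if c not in BAD)
--     return [w for w in cleaned.split(SEP) if w]
-- ===== Notes on version B (the rewrite author's own statement) =====
-- stated objective: alternative
-- what changed: Instead of A's per-word loop of eleven chained .replace scans, B joins the whole tweet once on a '\x00' sentinel (absent from the printable-ASCII domain), removes the eleven characters in one flat pass over the single joined text, then splits back on the sentinel and drops empty pieces.
import Mathlib
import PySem

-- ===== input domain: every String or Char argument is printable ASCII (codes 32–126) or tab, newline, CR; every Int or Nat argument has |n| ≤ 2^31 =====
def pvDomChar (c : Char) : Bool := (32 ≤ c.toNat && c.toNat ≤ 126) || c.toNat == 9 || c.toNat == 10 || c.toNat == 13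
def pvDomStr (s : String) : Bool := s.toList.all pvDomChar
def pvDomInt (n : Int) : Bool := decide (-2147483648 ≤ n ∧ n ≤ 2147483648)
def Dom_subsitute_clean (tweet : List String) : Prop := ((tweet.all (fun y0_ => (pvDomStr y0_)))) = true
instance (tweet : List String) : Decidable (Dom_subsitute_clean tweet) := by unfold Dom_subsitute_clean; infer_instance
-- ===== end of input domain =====

-- B replaces A's per-word loop of eleven chained substring .replace scans by a different
-- pipeline: join the whole tweet once on a '\x00' sentinel (absent from the domain's
-- printable-ASCII strings), clean the single joined text in one flat pass, then split it
-- back on the sentinel and drop the empty pieces (objective: alternative).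

-- ===== PORT A =====
def subsitute_clean (tweet : List String) : List String :=
  tweet.foldl (fun words word =>
    let w :=
      PySem.Str.replace (PySem.Str.replace (PySem.Str.replace (PySem.Str.replace (PySem.Str.replace
        (PySem.Str.replace (PySem.Str.replace (PySem.Str.replace (PySem.Str.replace (PySem.Str.replace
          (PySem.Str.replace word "#" "") "!" "") "?" "") "-" "") ":" "") "2" "") "'" "") "&" "") ")" "") "/" "") "(" ""
    if w ≠ "" then words ++ [w] else words) []

-- ===== PORT B =====
-- BAD = frozenset("#!?-:2'&)/(")
def pvBadChars : List Char := ['#', '!', '?', '-', ':', '2', '\'', '&', ')', '/', '(']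
-- SEP = '\x00'
def pvSep : String := "\x00"

def subsitute_clean_alt (tweet : List String) : List String :=
  let joined := PySem.Str.join pvSep tweet
  let cleaned := String.ofList (joined.toList.filter (fun c => !(pvBadChars.contains c)))
  -- cleaned.split(SEP): sep is the nonempty literal '\x00', so Python's split is Chars.splitOn
  ((PySem.Chars.splitOn cleaned.toList pvSep.toList).map String.ofList).filter (fun w => w ≠ "")

-- ===== PRECONDITION & SPEC =====
def Spec_subsitute_clean (tweet : List String) (out : List String) : Prop := out = subsitute_clean_alt tweet
instance (tweet : List String) (out : List String) : Decidable (Spec_subsitute_clean tweet out) := by unfold Spec_subsitute_clean; infer_instance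

-- ===== CLAIM (what is proved, stated in full; the proofs are below) =====
def Claim_equal_subsitute_clean : Prop := ∀ (tweet : List String), Dom_subsitute_clean tweet → Spec_subsitute_clean tweet (subsitute_clean tweet)

-- ===== LEMMAS AND PROOFS =====

-- the per-word cleaning both programs effectively perform
def pvCleanF (w : String) : String := String.ofList (w.toList.filter (fun c => !(pvBadChars.contains c)))

-- PySem.Chars.replace.go with a single-character pattern and empty replacement is a filter.
lemma go_single (c : Char) : ∀ (l acc : List Char) (fuel : Nat), l.length ≤ fuel →
    PySem.Chars.replace.go [c] [] fuel l acc = acc.reverse ++ l.filter (fun x => !(x == c)) := by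
  intro l
  induction l with
  | nil => intro acc fuel _; cases fuel <;> simp [PySem.Chars.replace.go]
  | cons x t ih =>
    intro acc fuel h
    cases fuel with
    | zero => simp at h
    | succ n =>
      simp only [PySem.Chars.replace.go]
      by_cases hx : c = x
      · subst hx
        simp only [List.isPrefixOf, beq_self_eq_true, Bool.true_and, if_pos]
        simp [ih acc n (by simpa using h)]
      · simp only [List.isPrefixOf]
        simp [hx, Ne.symm hx, ih (x :: acc) n (by simpa using h)]

lemma rep_single (s : List Char) (c : Char) :
    PySem.Chars.replace s [c] [] = s.filter (fun x => !(x == c)) := by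
  simp [PySem.Chars.replace, go_single c s [] s.length le_rfl]

lemma strrep_single (s : String) (c : Char) :
    PySem.Str.replace s (String.ofList [c]) "" = String.ofList (s.toList.filter (fun x => !(x == c))) := by
  simp [PySem.Str.replace, rep_single]

-- A's eleven chained single-character replaces equal the one-pass membership filter.
lemma clean_eq (word : String) :
    PySem.Str.replace (PySem.Str.replace (PySem.Str.replace (PySem.Str.replace (PySem.Str.replace
      (PySem.Str.replace (PySem.Str.replace (PySem.Str.replace (PySem.Str.replace (PySem.Str.replace
        (PySem.Str.replace word "#" "") "!" "") "?" "") "-" "") ":" "") "2" "") "'" "") "&" "") ")" "") "/" "") "(" ""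
    = pvCleanF word := by
  simp only [
    show ("#":String) = String.ofList ['#'] from rfl,
    show ("!":String) = String.ofList ['!'] from rfl,
    show ("?":String) = String.ofList ['?'] from rfl,
    show ("-":String) = String.ofList ['-'] from rfl,
    show (":":String) = String.ofList [':'] from rfl,
    show ("2":String) = String.ofList ['2'] from rfl,
    show ("'":String) = String.ofList ['\''] from rfl,
    show ("&":String) = String.ofList ['&'] from rfl,
    show (")":String) = String.ofList [')'] from rfl,
    show ("/":String) = String.ofList ['/'] from rfl,
    show ("(":String) = String.ofList ['('] from rfl,
    strrep_single, String.toList_ofList, List.filter_filter, pvCleanF, pvBadChars]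
  congr 1
  apply List.filter_congr
  intro c _
  by_cases h1 : c = '#' <;> by_cases h2 : c = '!' <;> by_cases h3 : c = '?' <;>
    by_cases h4 : c = '-' <;> by_cases h5 : c = ':' <;> by_cases h6 : c = '2' <;>
    by_cases h7 : c = '\'' <;> by_cases h8 : c = '&' <;> by_cases h9 : c = ')' <;>
    by_cases h10 : c = '/' <;> by_cases h11 : c = '(' <;> simp_all

-- A as filter-then-map over the words
lemma a_as_filter_map (tweet : List String) :
    subsitute_clean tweet = (tweet.filter (fun w => pvCleanF w ≠ "")).map pvCleanF := by
  unfold subsitute_clean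
  have hf : (fun (words : List String) (word : String) =>
      let w :=
        PySem.Str.replace (PySem.Str.replace (PySem.Str.replace (PySem.Str.replace (PySem.Str.replace
          (PySem.Str.replace (PySem.Str.replace (PySem.Str.replace (PySem.Str.replace (PySem.Str.replace
            (PySem.Str.replace word "#" "") "!" "") "?" "") "-" "") ":" "") "2" "") "'" "") "&" "") ")" "") "/" "") "(" ""
      if w ≠ "" then words ++ [w] else words)
      = (fun (words : List String) (word : String) =>
          if (fun w => decide (pvCleanF w ≠ "")) word = true then words ++ [pvCleanF word] else words) := by
    funext words word
    simp only [clean_eq, decide_eq_true_eq]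
  rw [hf, PySem.List.foldl_append_if (fun w => decide (pvCleanF w ≠ "")) pvCleanF tweet []]
  simp

-- specification recursion for split on a single character
def pvSplitChar (c : Char) : List Char → List Char → List (List Char)
  | [], cur => [cur.reverse]
  | x :: t, cur => if x = c then cur.reverse :: pvSplitChar c t [] else pvSplitChar c t (x :: cur)

lemma go_eq_splitChar (c : Char) : ∀ (fuel : Nat) (l cur : List Char) (acc : List (List Char)),
    l.length < fuel →
    PySem.Chars.splitOn.go [c] fuel l cur acc = acc.reverse ++ pvSplitChar c l cur := by
  intro fuel
  induction fuel with
  | zero => intro l cur acc h; omega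
  | succ n ih =>
    intro l cur acc h
    cases l with
    | nil => simp [PySem.Chars.splitOn.go, pvSplitChar]
    | cons x t =>
      simp only [PySem.Chars.splitOn.go, List.isPrefixOf, Bool.and_true]
      by_cases hx : c = x
      · subst hx
        rw [if_pos (by simp)]
        rw [ih _ _ _ (by simpa using h)]
        simp [pvSplitChar]
      · rw [if_neg (by simp [hx])]
        rw [ih _ _ _ (by simpa using h)]
        simp [pvSplitChar, Ne.symm hx]

lemma splitOn_single (l : List Char) (c : Char) :
    PySem.Chars.splitOn l [c] = pvSplitChar c l [] := by
  simpa using go_eq_splitChar c (l.length + 1) l [] [] (by omega)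

-- pushing a sentinel-free prefix into the accumulator
lemma splitChar_no (c : Char) : ∀ (p l cur : List Char), c ∉ p →
    pvSplitChar c (p ++ l) cur = pvSplitChar c l (p.reverse ++ cur) := by
  intro p
  induction p with
  | nil => intro l cur _; simp
  | cons x t ih =>
    intro l cur hc
    have hx : x ≠ c := fun h => hc (by simp [h])
    simp only [List.cons_append, pvSplitChar, if_neg hx]
    rw [ih l (x :: cur) (fun h => hc (by simp [h]))]
    simp

lemma splitChar_intercalate (c : Char) : ∀ (parts : List (List Char)) (p : List Char), c ∉ p →
    (∀ q ∈ parts, c ∉ q) →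
    pvSplitChar c (List.intercalate [c] (p :: parts)) [] = p :: parts := by
  intro parts
  induction parts with
  | nil =>
    intro p hp _
    rw [show List.intercalate [c] [p] = p ++ [] by simp [List.intercalate]]
    rw [splitChar_no c p [] [] hp]
    simp [pvSplitChar]
  | cons q t ih =>
    intro p hp hq
    rw [show List.intercalate [c] (p :: q :: t) = p ++ ([c] ++ List.intercalate [c] (q :: t)) by
      simp [List.intercalate, List.intersperse]]
    rw [splitChar_no c p _ [] hp]
    simp only [List.append_nil, List.singleton_append, pvSplitChar]
    rw [ih q (hq q (by simp)) (fun r hr => hq r (by simp [hr]))]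
    simp

-- a kept-everywhere character lets filter pass through the sentinel-joined text
lemma filter_intercalate (p : Char → Bool) (c : Char) (hc : p c = true) :
    ∀ (parts : List (List Char)),
    (List.intercalate [c] parts).filter p = List.intercalate [c] (parts.map (fun q => q.filter p)) := by
  intro parts
  induction parts with
  | nil => simp [List.intercalate]
  | cons a t ih =>
    cases t with
    | nil => simp [List.intercalate]
    | cons b t' =>
      rw [show List.intercalate [c] (a :: b :: t') = a ++ ([c] ++ List.intercalate [c] (b :: t')) by
        simp [List.intercalate, List.intersperse]]
      rw [show List.intercalate [c] ((a :: b :: t').map (fun q => q.filter p))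
            = a.filter p ++ ([c] ++ List.intercalate [c] ((b :: t').map (fun q => q.filter p))) by
        simp [List.intercalate]]
      simp [List.filter_append, hc, ih]

lemma sep_not_mem_of_dom (w : String) (h : pvDomStr w = true) : '\x00' ∉ w.toList := by
  intro hmem
  simp only [pvDomStr, List.all_eq_true] at h
  have := h _ hmem
  simp [pvDomChar] at this

-- ===== VERDICT (by name: the statement is the Claim_ definition above) =====
theorem subsitute_clean_spec : Claim_equal_subsitute_clean := by
  intro tweet hdom
  unfold Spec_subsitute_clean
  rw [a_as_filter_map]
  unfold subsitute_clean_alt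
  simp only [PySem.Str.join, PySem.Chars.join, String.toList_ofList]
  rw [show pvSep.toList = ['\x00'] from rfl]
  rw [filter_intercalate (fun c => !(pvBadChars.contains c)) '\x00' (by decide)]
  rw [List.map_map]
  cases tweet with
  | nil => simp [List.intercalate, splitOn_single, pvSplitChar]
  | cons w ws =>
    have hdom' : ∀ u ∈ w :: ws, '\x00' ∉ u.toList := by
      intro u hu
      unfold Dom_subsitute_clean at hdom
      simp only [List.all_eq_true] at hdom
      exact sep_not_mem_of_dom u (hdom u hu)
    simp only [Function.comp_def, List.map_cons]
    rw [splitOn_single]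
    rw [splitChar_intercalate '\x00' _ _
      (fun hmem => hdom' w (by simp) (List.mem_of_mem_filter hmem))
      (by
        intro q hq
        simp only [List.mem_map] at hq
        obtain ⟨u, hu, rfl⟩ := hq
        exact fun hmem => hdom' u (by simp [hu]) (List.mem_of_mem_filter hmem))]
    rw [show (List.filter (fun c => !pvBadChars.contains c) w.toList ::
          List.map (fun x => List.filter (fun c => !pvBadChars.contains c) x.toList) ws)
        = List.map (fun x => List.filter (fun c => !pvBadChars.contains c) x.toList) (w :: ws) from rfl]
    rw [List.map_map, List.filter_map]
    simp only [Function.comp_def, pvCleanF]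
    rfl
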